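-- pv_equiv track=rewrite | github.com/RawwBear/WDI | Zestaw 3/20.py | ss_prime_factors
-- ===== SOURCE A (Python) =====
-- def is_valid(n, product):#n is next element in the sequence, product is curr_product of the ss
--     if product % n == 0:
--         return False
--     divisor = 2
--     already_divided = False
--     while n > 1:
--         if n % divisor == 0:
--             if product % divisor == 0 or already_divided:
--                 return False
--             already_divided = True
--             n //= divisor
--         else:
--             divisor += 1
--             already_divided = False
--     return True
--
-- def ss_prime_factors(t):
--     i, j = 0, 0
--     curr_len, max_len = 1, 1
--     curr_product = t[0]
--     while j != len(t) - 1: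
--         if is_valid(t[j + 1], curr_product):
--             curr_product *= t[j + 1]
--             j += 1
--             curr_len += 1
--             if curr_len > max_len:
--                 max_len = curr_len
--         else:
--             if curr_product == 1:
--                 i += 1
--                 j += 1
--             else:
--                 curr_product //= t[i]
--                 i += 1
--                 curr_len -= 1
--     return max_len
-- ===== SOURCE B (Python) =====
-- def _ok(n, product):
--     if product % n == 0:
--         return False
--     d = 2
--     while d * d <= n:
--         if n % d == 0:
--             n //= d
--             if n % d == 0 or product % d == 0:
--                 return False
--         else:
--             d += 1
--     return n == 1 or product % n != 0
--
-- def ss_prime_factors(t):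
--     i = 0
--     best = 1
--     product = t[0]
--     for j in range(1, len(t)):
--         n = t[j]
--         while product != 1 and not _ok(n, product):
--             product //= t[i]
--             i += 1
--         if _ok(n, product):
--             product *= n
--             if j - i + 1 > best:
--                 best = j - i + 1
--         else:
--             i = j + 1
--     return best
-- ===== Notes on version B (the rewrite author's own statement) =====
-- stated objective: faster
-- what changed: A re-runs a fused trial-division validity test that walks divisors up to the element's largest prime factor inside one while-loop state machine with explicit curr_len/max_len bookkeeping; B is a for-loop two-pointer whose validity test is sqrt-bounded trial division (strip factors while d*d<=n, then check the single leftover prime), so each test costs O(sqrt(n)) instead of O(n).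
-- outside the precondition, e.g. on ss_prime_factors([1, 4, 2]): A returns 2, B returns 1; on ss_prime_factors([1, 4, 3, 9]): A raises IndexError, B returns 1; on ss_prime_factors([0]): A returns 1, B returns 1
import Mathlib
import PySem

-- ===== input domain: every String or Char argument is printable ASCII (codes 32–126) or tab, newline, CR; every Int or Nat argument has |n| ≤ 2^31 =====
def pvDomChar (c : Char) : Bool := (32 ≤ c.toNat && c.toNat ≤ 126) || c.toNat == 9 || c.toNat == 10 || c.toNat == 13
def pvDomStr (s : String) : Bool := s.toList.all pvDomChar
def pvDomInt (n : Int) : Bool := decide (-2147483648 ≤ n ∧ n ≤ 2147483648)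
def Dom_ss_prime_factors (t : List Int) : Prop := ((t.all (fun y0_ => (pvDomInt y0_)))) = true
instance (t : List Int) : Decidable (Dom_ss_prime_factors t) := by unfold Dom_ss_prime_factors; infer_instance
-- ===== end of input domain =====

-- B replaces A's while-loop state machine (fused trial-division validity test walking divisors up
-- to the element's largest prime factor, re-run after every shrink, with explicit length counters)
-- by a for-loop two-pointer window whose validity test is sqrt-bounded trial division.

-- ===== PORT A =====
-- the while-loop of is_valid; fuel only makes the recursion total, each step mirrors one Python iteration
def isValidLoop : Nat → Int → Int → Bool → Int → Bool
  | 0, _, _, _, _ => true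
  | fuel+1, n, divisor, already, product =>
    if 1 < n then
      if PySem.Int.mod n divisor == 0 then
        if PySem.Int.mod product divisor == 0 || already then false
        else isValidLoop fuel (PySem.Int.floordiv n divisor) divisor true product
      else isValidLoop fuel n (divisor + 1) false product
    else true

def is_valid (n product : Int) : Bool :=
  if PySem.Int.mod product n == 0 then false
  else isValidLoop (2 * n.toNat + 2) n 2 false product

-- A's main while-loop; one recursive call per Python iteration (fuel = totalization only)
def loopA (t : List Int) : Nat → Int → Int → Int → Int → Int → Int
  | 0, _, _, _, maxLen, _ => maxLen
  | fuel+1, i, j, currLen, maxLen, currProduct =>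
    if j ≠ (t.length : Int) - 1 then
      if is_valid (PySem.List.pyGetD t (j+1) 0) currProduct then
        loopA t fuel i (j+1) (currLen + 1)
          (if currLen + 1 > maxLen then currLen + 1 else maxLen)
          (currProduct * PySem.List.pyGetD t (j+1) 0)
      else if currProduct == 1 then
        loopA t fuel (i+1) (j+1) currLen maxLen currProduct
      else
        loopA t fuel (i+1) j (currLen - 1) maxLen
          (PySem.Int.floordiv currProduct (PySem.List.pyGetD t i 0))
    else maxLen

def ss_prime_factors (t : List Int) : Int :=
  loopA t (2 * t.length + 2) 0 0 1 1 (PySem.List.pyGetD t 0 0)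

-- ===== PORT B =====
-- _ok's while-loop (sqrt-bounded trial division); fuel = totalization only
def okLoop : Nat → Int → Int → Int → Bool
  | 0, _, _, _ => true
  | fuel+1, n, d, product =>
    if d * d ≤ n then
      if PySem.Int.mod n d == 0 then
        if PySem.Int.mod (PySem.Int.floordiv n d) d == 0 || PySem.Int.mod product d == 0 then false
        else okLoop fuel (PySem.Int.floordiv n d) d product
      else okLoop fuel n (d + 1) product
    else (n == 1 || !(PySem.Int.mod product n == 0))

def pv_ok (n product : Int) : Bool :=
  if PySem.Int.mod product n == 0 then false
  else okLoop (2 * n.toNat + 2) n 2 product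

-- the inner while of B (shrink the window while the element cannot join)
def shrinkB (t : List Int) (n : Int) : Nat → Int → Int → Int × Int
  | 0, i, product => (i, product)
  | fuel+1, i, product =>
    if !(product == 1) && !(pv_ok n product) then
      shrinkB t n fuel (i + 1) (PySem.Int.floordiv product (PySem.List.pyGetD t i 0))
    else (i, product)

-- B's for-loop over j = 1 .. len(t)-1 (rem = number of indices still to process)
def loopB (t : List Int) : Nat → Nat → Int → Int → Int → Int
  | 0, _, _, best, _ => best
  | rem+1, j, i, best, product =>
    let n := PySem.List.pyGetD t (j : Int) 0
    let s := shrinkB t n (t.length + 1) i product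
    if pv_ok n s.2 then
      loopB t rem (j+1) s.1
        (if (j : Int) - s.1 + 1 > best then (j : Int) - s.1 + 1 else best)
        (s.2 * n)
    else
      loopB t rem (j+1) ((j : Int) + 1) best s.2

def ss_prime_factors_alt (t : List Int) : Int :=
  loopB t (t.length - 1) 1 0 1 (PySem.List.pyGetD t 0 0)

-- ===== PRECONDITION & SPEC =====
-- Pre_ excludes only the empty list (A raises IndexError), lists containing 0 (A raises
-- ZeroDivisionError whenever a 0 is reached, except for the single-element list [0]), and lists
-- whose FIRST element is 1 (there A's window product desynchronizes from its index bookkeeping: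
-- it raises IndexError on some such lists and returns accidental values on others, which B,
-- whose window stays consistent, does not reproduce).
def Pre_ss_prime_factors (t : List Int) : Prop :=
  t ≠ [] ∧ t.getD 0 0 ≠ 1 ∧ ∀ x ∈ t, x ≠ 0
instance (t : List Int) : Decidable (Pre_ss_prime_factors t) := by unfold Pre_ss_prime_factors; infer_instance
def pvWitness_ss_prime_factors : List Int := [2, 3]

def Spec_ss_prime_factors (t : List Int) (out : Int) : Prop := out = ss_prime_factors_alt t
instance (t : List Int) (out : Int) : Decidable (Spec_ss_prime_factors t out) := by unfold Spec_ss_prime_factors; infer_instance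

-- ===== CLAIM (what is proved, stated in full; the proofs are below) =====
def Claim_equal_ss_prime_factors : Prop := ∀ (t : List Int), Dom_ss_prime_factors t → Pre_ss_prime_factors t → Spec_ss_prime_factors t (ss_prime_factors t)

-- ===== LEMMAS AND PROOFS =====

-- every prime factor p ≥ d of n is simple in n and does not divide P
def OKfrom (d n P : Int) : Prop :=
  ∀ p : Int, Prime p → d ≤ p → p ∣ n → ¬ p ∣ P ∧ ¬ p * p ∣ n

lemma least_div_prime (d n : Int) (hd : 2 ≤ d) (hdn : d ∣ n) (hn : 1 ≤ n)
    (hmin : ∀ k : Int, 2 ≤ k → k < d → ¬ k ∣ n) : Prime d := by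
  obtain ⟨p, hp, hpd⟩ := Nat.exists_prime_and_dvd (n := d.toNat) (by omega)
  have hple : (p : Int) ∣ d := by
    have : (p : Int) ∣ (d.toNat : Int) := Int.natCast_dvd_natCast.mpr hpd
    rwa [Int.toNat_of_nonneg (by omega)] at this
  have hp2 : 2 ≤ (p : Int) := by exact_mod_cast hp.two_le
  have hpdn : (p : Int) ∣ n := hple.trans hdn
  have hpd' : (p : Int) ≤ d := Int.le_of_dvd (by omega) hple
  have : ¬ (p : Int) < d := fun h => hmin _ hp2 h hpdn
  have hpeq : (p : Int) = d := by omega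
  rw [← hpeq]
  exact_mod_cast Nat.prime_iff_prime_int.mp hp

-- transfer of the OKfrom predicate across stripping one least prime factor d from n
lemma OKfrom_strip (d n n' P : Int) (h2 : 2 ≤ d) (hdp : Prime d) (hn' : n = d * n')
    (hn'1 : 1 ≤ n') (hPd : ¬ d ∣ P)
    (h3 : ∀ k : Int, 2 ≤ k → k < d → ¬ k ∣ n) :
    (OKfrom d n P ↔ (¬ d ∣ n' ∧ OKfrom d n' P)) := by
  have hside : ∀ p : Int, Prime p → d ≤ p → p ≠ d → p ∣ n → (¬ p ∣ d ∧ p ∣ n') := by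
    intro p hp hdp' hne hpn
    have hp2 : 2 ≤ p := le_trans h2 hdp'
    have hnd : ¬ p ∣ d := by
      intro hpdvd
      have : p ≤ d := Int.le_of_dvd (by omega) hpdvd
      omega
    rcases hp.dvd_mul.mp (by rwa [← hn']) with h | h
    · exact absurd h hnd
    · exact ⟨hnd, h⟩
  constructor
  · intro hOK
    have hdd : ¬ d ∣ n' := by
      intro hdn'
      have hsq : d * d ∣ n := by
        rw [hn']; exact mul_dvd_mul_left d hdn'
      exact (hOK d hdp le_rfl ⟨n', hn'⟩).2 hsq
    refine ⟨hdd, ?_⟩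
    intro p hp hdp' hpn'
    have hpn : p ∣ n := hpn'.trans ⟨d, by rw [hn']; ring⟩
    obtain ⟨hP, hsq⟩ := hOK p hp hdp' hpn
    refine ⟨hP, fun hsq' => hsq (hsq'.trans ⟨d, by rw [hn']; ring⟩)⟩
  · rintro ⟨hdd, hOK'⟩
    intro p hp hdp' hpn
    by_cases hpe : p = d
    · subst hpe
      refine ⟨hPd, fun hsq => ?_⟩
      have : p ∣ n' := by
        have : p * p ∣ p * n' := by rwa [← hn']
        exact (mul_dvd_mul_iff_left hp.ne_zero).mp this
      exact hdd this
    · obtain ⟨hnd, hpn'⟩ := hside p hp hdp' hpe hpn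
      obtain ⟨hP, hsq'⟩ := hOK' p hp hdp' hpn'
      refine ⟨hP, fun hsq => hsq' ?_⟩
      have hco : IsCoprime p d := (hp.coprime_iff_not_dvd).mpr hnd
      have hco2 : IsCoprime (p * p) d := hco.mul_left hco
      exact hco2.dvd_of_dvd_mul_left (by rwa [hn', mul_comm] at hsq)

lemma OKfrom_step (d n P : Int) (h2 : 2 ≤ d) (hnd : ¬ d ∣ n) :
    (OKfrom d n P ↔ OKfrom (d+1) n P) := by
  constructor
  · intro h p hp hdp' hpn
    exact h p hp (by omega) hpn
  · intro h p hp hdp' hpn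
    rcases eq_or_lt_of_le hdp' with he | hl
    · exact absurd (he ▸ hpn) hnd
    · exact h p hp (by omega) hpn

lemma isValidLoop_char (fuel : Nat) : ∀ (n d P : Int) (already : Bool),
    1 ≤ n → 2 ≤ d → (∀ k : Int, 2 ≤ k → k < d → ¬ k ∣ n) →
    (2 * n - d).toNat + 1 ≤ fuel →
    (isValidLoop fuel n d already P = true ↔
      (¬ (1 < n ∧ already = true ∧ d ∣ n) ∧ OKfrom d n P)) := by
  induction fuel with
  | zero => intro n d P a h1 h2 h3 hf; omega
  | succ fuel ih =>
    intro n d P already h1 h2 h3 hf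
    by_cases hn : 1 < n
    · have hdn : d ≤ n := by
        by_contra hlt
        exact h3 n (by omega) (by omega) dvd_rfl
      by_cases hdvd : d ∣ n
      · have hdp : Prime d := least_div_prime d n h2 hdvd h1 h3
        have hmod : (PySem.Int.mod n d == 0) = true := by
          simp [PySem.Int.mod_eq_zero_iff_dvd, hdvd]
        by_cases halr : already = true
        · subst halr
          simp only [isValidLoop, if_pos hn, hmod, if_pos rfl, Bool.or_true, if_true]
          simp only [false_iff, Bool.false_eq_true, not_and]
          intro h
          exact absurd h (by simp [hn, hdvd])
        · have halr' : already = false := by cases already <;> simp_all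
          subst halr'
          by_cases hPd : d ∣ P
          · have hmodP : (PySem.Int.mod P d == 0) = true := by
              simp [PySem.Int.mod_eq_zero_iff_dvd, hPd]
            simp only [isValidLoop, if_pos hn, hmod, if_pos rfl, hmodP, Bool.true_or, if_true]
            constructor
            · intro h; exact absurd h (by simp)
            · rintro ⟨-, hOK⟩
              exact absurd hPd (hOK d hdp le_rfl hdvd).1
          · have hmodP : (PySem.Int.mod P d == 0) = false := by
              simp [PySem.Int.mod_eq_zero_iff_dvd, hPd]
            obtain ⟨n', hn'⟩ := hdvd
            have hfd : PySem.Int.floordiv n d = n' := by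
              rw [hn', PySem.Int.floordiv_eq_ediv_of_pos (by omega),
                Int.mul_ediv_cancel_left _ (by omega : d ≠ 0)]
            have hn'1 : 1 ≤ n' := by nlinarith
            have hn2 : 2 * n' ≤ n := by nlinarith
            have h3' : ∀ k : Int, 2 ≤ k → k < d → ¬ k ∣ n' := by
              intro k hk hkd hkdvd
              exact h3 k hk hkd (hkdvd.trans ⟨d, by rw [hn']; ring⟩)
            simp only [isValidLoop, if_pos hn, hmod, if_pos rfl, hmodP, Bool.or_false,
              Bool.false_eq_true, if_false, if_true, hfd]
            rw [ih n' d P true hn'1 h2 h3' (by omega)]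
            have hstrip := OKfrom_strip d n n' P h2 hdp hn' hn'1 hPd h3
            constructor
            · rintro ⟨hc, hOK'⟩
              refine ⟨by simp, hstrip.mpr ⟨?_, hOK'⟩⟩
              intro hdn'
              have h1n' : 1 < n' := by
                have := Int.le_of_dvd (by omega) hdn'
                omega
              exact hc ⟨h1n', rfl, hdn'⟩
            · rintro ⟨-, hOK⟩
              obtain ⟨hdd, hOK'⟩ := hstrip.mp hOK
              exact ⟨fun h => hdd h.2.2, hOK'⟩
      · have hmod : (PySem.Int.mod n d == 0) = false := by
          simp [PySem.Int.mod_eq_zero_iff_dvd, hdvd]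
        have h3' : ∀ k : Int, 2 ≤ k → k < d + 1 → ¬ k ∣ n := by
          intro k hk hkd
          rcases eq_or_lt_of_le (by omega : k ≤ d) with he | hl
          · subst he; exact hdvd
          · exact h3 k hk hl
        simp only [isValidLoop, if_pos hn, hmod, Bool.false_eq_true, if_false, if_true]
        rw [ih n (d+1) P false h1 (by omega) h3' (by omega)]
        rw [OKfrom_step d n P h2 hdvd]
        simp [hdvd]
    · have hne : n = 1 := by omega
      subst hne
      simp only [isValidLoop, if_neg (by omega : ¬ (1:Int) < 1), true_iff]
      refine ⟨by simp, ?_⟩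
      intro p hp _ hpd
      exact absurd (isUnit_of_dvd_one hpd) hp.not_unit

-- n ≥ 2 has a positive prime divisor
lemma exists_prime_dvd (n : Int) (hn : 2 ≤ n) :
    ∃ p : Int, Prime p ∧ 2 ≤ p ∧ p ∣ n := by
  obtain ⟨p, hp, hpd⟩ := Nat.exists_prime_and_dvd (n := n.toNat) (by omega)
  refine ⟨(p : Int), Nat.prime_iff_prime_int.mp hp, by exact_mod_cast hp.two_le, ?_⟩
  have : (p : Int) ∣ (n.toNat : Int) := Int.natCast_dvd_natCast.mpr hpd
  rwa [Int.toNat_of_nonneg (by omega)] at this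

-- a number with no divisor in [2, d) and d*d > n is 1 or prime
lemma no_small_div_prime (n d : Int) (hn : 2 ≤ n) (hd : 2 ≤ d)
    (h3 : ∀ k : Int, 2 ≤ k → k < d → ¬ k ∣ n) (hdd : n < d * d) : Prime n := by
  obtain ⟨q, hq, hq2, hqn⟩ := exists_prime_dvd n hn
  have hqd : d ≤ q := by
    by_contra hlt
    exact h3 q hq2 (by omega) hqn
  obtain ⟨m, hm⟩ := hqn
  have hm1 : 1 ≤ m := by nlinarith
  by_cases hm2 : m = 1
  · rw [hm2] at hm
    rw [hm, mul_one]
    exact hq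
  · exfalso
    obtain ⟨r, hr, hr2, hrm⟩ := exists_prime_dvd m (by omega)
    have hrn : r ∣ n := hrm.trans ⟨q, by rw [hm]; ring⟩
    have hrd : d ≤ r := by
      by_contra hlt
      exact h3 r hr2 (by omega) hrn
    have : q * r ≤ q * m := by
      have := Int.le_of_dvd (by omega) hrm
      nlinarith
    nlinarith

lemma prime_pos_dvd_prime (p n : Int) (hn : Prime n) (hp2 : 2 ≤ p) (h2n : 2 ≤ n)
    (hpd : p ∣ n) : p = n := by
  have h1 : p.natAbs ∣ n.natAbs := Int.natAbs_dvd_natAbs.mpr hpd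
  have hnn : Nat.Prime n.natAbs := Int.prime_iff_natAbs_prime.mp hn
  rcases hnn.eq_one_or_self_of_dvd _ h1 with h | h <;> omega

lemma okLoop_char (fuel : Nat) : ∀ (n d P : Int),
    1 ≤ n → 2 ≤ d → (∀ k : Int, 2 ≤ k → k < d → ¬ k ∣ n) →
    (2 * n - d).toNat + 1 ≤ fuel →
    (okLoop fuel n d P = true ↔ OKfrom d n P) := by
  induction fuel with
  | zero => intro n d P h1 h2 h3 hf; omega
  | succ fuel ih =>
    intro n d P h1 h2 h3 hf
    by_cases hdd : d * d ≤ n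
    · have hda : d ≤ n := by nlinarith
      by_cases hdvd : d ∣ n
      · have hn : 1 < n := by nlinarith
        have hdp : Prime d := least_div_prime d n h2 hdvd h1 h3
        have hmod : (PySem.Int.mod n d == 0) = true := by
          simp [PySem.Int.mod_eq_zero_iff_dvd, hdvd]
        obtain ⟨n', hn'⟩ := hdvd
        have hfd : PySem.Int.floordiv n d = n' := by
          rw [hn', PySem.Int.floordiv_eq_ediv_of_pos (by omega),
            Int.mul_ediv_cancel_left _ (by omega : d ≠ 0)]
        have hn'1 : 1 ≤ n' := by nlinarith
        have hn2 : 2 * n' ≤ n := by nlinarith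
        have h3' : ∀ k : Int, 2 ≤ k → k < d → ¬ k ∣ n' := by
          intro k hk hkd hkdvd
          exact h3 k hk hkd (hkdvd.trans ⟨d, by rw [hn']; ring⟩)
        have hstrip := OKfrom_strip d n n' P h2 hdp hn' hn'1
        by_cases hbad : d ∣ n' ∨ d ∣ P
        · have hmods : (PySem.Int.mod n' d == 0 || PySem.Int.mod P d == 0) = true := by
            rcases hbad with h | h
            · simp [PySem.Int.mod_eq_zero_iff_dvd, h]
            · simp [PySem.Int.mod_eq_zero_iff_dvd, h]
          simp only [okLoop, if_pos hdd, hmod, if_true, hfd, hmods]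
          simp only [Bool.false_eq_true, false_iff]
          intro hOK
          rcases hbad with h | h
          · exact (hOK d hdp le_rfl ⟨n', hn'⟩).2 (by rw [hn']; exact mul_dvd_mul_left d h)
          · exact (hOK d hdp le_rfl ⟨n', hn'⟩).1 h
        · push_neg at hbad
          have hmods : (PySem.Int.mod n' d == 0 || PySem.Int.mod P d == 0) = false := by
            simp [PySem.Int.mod_eq_zero_iff_dvd, hbad.1, hbad.2]
          simp only [okLoop, if_pos hdd, hmod, if_true, hfd, hmods,
            Bool.false_eq_true, if_false]
          rw [ih n' d P hn'1 h2 h3' (by omega)]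
          rw [hstrip hbad.2 h3]
          constructor
          · intro h; exact ⟨hbad.1, h⟩
          · rintro ⟨-, h⟩; exact h
      · have hmod : (PySem.Int.mod n d == 0) = false := by
          simp [PySem.Int.mod_eq_zero_iff_dvd, hdvd]
        have h3' : ∀ k : Int, 2 ≤ k → k < d + 1 → ¬ k ∣ n := by
          intro k hk hkd
          rcases eq_or_lt_of_le (by omega : k ≤ d) with he | hl
          · subst he; exact hdvd
          · exact h3 k hk hl
        simp only [okLoop, if_pos hdd, hmod, Bool.false_eq_true, if_false, if_true]
        rw [ih n (d+1) P h1 (by omega) h3' (by omega)]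
        exact (OKfrom_step d n P h2 hdvd).symm
    · -- d*d > n : the loop returns n == 1 || P % n != 0, and n is 1 or prime
      have hunf : okLoop (fuel+1) n d P = (n == 1 || !(PySem.Int.mod P n == 0)) := by
        simp only [okLoop, if_neg hdd]
      rw [hunf]
      by_cases hone : n = 1
      · subst hone
        constructor
        · intro _ p hp _ hpd
          exact absurd (isUnit_of_dvd_one hpd) hp.not_unit
        · intro _; simp
      · have hn2 : 2 ≤ n := by omega
        have hnp : Prime n := no_small_div_prime n d hn2 h2 h3 (by omega)
        have hdn : d ≤ n := by
          by_contra hlt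
          exact h3 n (by omega) (by omega) dvd_rfl
        have hb1 : (n == 1) = false := by simp [hone]
        by_cases hPn : n ∣ P
        · have hmm : (PySem.Int.mod P n == 0) = true := by
            simp [PySem.Int.mod_eq_zero_iff_dvd, hPn]
          rw [hb1, hmm]
          simp only [Bool.not_true, Bool.or_false, Bool.false_eq_true, false_iff]
          intro hOK
          exact (hOK n hnp hdn dvd_rfl).1 hPn
        · have hmm : (PySem.Int.mod P n == 0) = false := by
            simp [PySem.Int.mod_eq_zero_iff_dvd, hPn]
          rw [hb1, hmm]
          simp only [Bool.not_false, Bool.or_true, true_iff]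
          intro p hp hdp' hpn
          have hp2 : 2 ≤ p := le_trans h2 hdp'
          have hpe : p = n := prime_pos_dvd_prime p n hnp hp2 hn2 hpn
          subst hpe
          refine ⟨hPn, ?_⟩
          intro hsq
          have := Int.le_of_dvd (by omega) hsq
          nlinarith

-- THE bridge: A's fused validity test equals B's sqrt-bounded one, for every nonzero element
lemma is_valid_eq_pv_ok (n P : Int) (hn : n ≠ 0) : is_valid n P = pv_ok n P := by
  unfold is_valid pv_ok
  by_cases hdvd : n ∣ P
  · have hmod : (PySem.Int.mod P n == 0) = true := by
      simp [PySem.Int.mod_eq_zero_iff_dvd, hdvd]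
    rw [hmod]
    rfl
  · have hmod : (PySem.Int.mod P n == 0) = false := by
      simp [PySem.Int.mod_eq_zero_iff_dvd, hdvd]
    rw [hmod]
    simp only [Bool.false_eq_true, if_false]
    rcases Int.lt_or_lt_of_ne hn with hneg | hpos
    · -- n < 0 : both loops fall through immediately
      have htn : n.toNat = 0 := by omega
      rw [htn]
      have h1 : isValidLoop (2 * 0 + 2) n 2 false P = true := by
        simp only [isValidLoop, if_neg (by omega : ¬ (1:Int) < n)]
      have h2 : okLoop (2 * 0 + 2) n 2 P = true := by
        have hmodP : (PySem.Int.mod P n == 0) = false := hmod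
        simp only [okLoop, if_neg (by nlinarith : ¬ (2:Int) * 2 ≤ n), hmodP]
        simp
      rw [h1, h2]
    · rcases eq_or_lt_of_le (by omega : (1:Int) ≤ n) with hone | hn2
      · exact absurd (hone ▸ one_dvd P) hdvd
      · have hc1 := isValidLoop_char (2 * n.toNat + 2) n 2 P false (by omega) le_rfl
          (by omega) (by omega)
        have hc2 := okLoop_char (2 * n.toNat + 2) n 2 P (by omega) le_rfl
          (by omega) (by omega)
        simp only [Bool.false_eq_true, false_and, and_false, not_false_iff, true_and] at hc1
        cases hv : okLoop (2 * n.toNat + 2) n 2 P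
        · cases hv2 : isValidLoop (2 * n.toNat + 2) n 2 false P
          · rfl
          · exfalso
            have := hc1.mp hv2
            rw [← hc2] at this
            rw [hv] at this
            exact Bool.false_ne_true this
        · exact hc1.mpr (hc2.mp hv)

-- ===== window product =====
def wprod (t : List Int) (i j : Nat) : Int := ((t.drop i).take (j + 1 - i)).prod

lemma wprod_empty (t : List Int) (i j : Nat) (h : j + 1 ≤ i) : wprod t i j = 1 := by
  unfold wprod
  rw [Nat.sub_eq_zero_of_le h, List.take_zero, List.prod_nil]

lemma wprod_shrink (t : List Int) (i j : Nat) (hij : i ≤ j) (hj : j < t.length) :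
    wprod t i j = t.getD i 0 * wprod t (i+1) j := by
  unfold wprod
  have hi : i < t.length := by omega
  rw [List.drop_eq_getElem_cons hi]
  have h1 : j + 1 - i = (j - i) + 1 := by omega
  have h2 : j + 1 - (i + 1) = j - i := by omega
  rw [h1, h2, List.take_succ_cons, List.prod_cons, List.getD_eq_getElem t 0 hi]

lemma wprod_extend (t : List Int) (i j : Nat) (hij : i ≤ j + 1) (hj : j + 1 < t.length) :
    wprod t i (j+1) = wprod t i j * t.getD (j+1) 0 := by
  unfold wprod
  have h1 : j + 1 + 1 - i = (j + 1 - i) + 1 := by omega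
  rw [h1, List.take_succ, List.prod_append]
  congr 1
  have hlt : j + 1 - i < (t.drop i).length := by
    rw [List.length_drop]; omega
  rw [List.getElem?_drop]
  have hidx : i + (j + 1 - i) = j + 1 := by omega
  rw [hidx, List.getElem?_eq_getElem hj]
  simp [List.getD, List.getElem?_eq_getElem hj]

lemma abs_prod_ge (l : List Int) (h : ∀ x ∈ l, 2 ≤ |x|) (hne : l ≠ []) : 2 ≤ |l.prod| := by
  induction l with
  | nil => exact absurd rfl hne
  | cons a m ih =>
    rw [List.prod_cons, abs_mul]
    have ha := h a List.mem_cons_self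
    by_cases hm : m = []
    · subst hm; simpa using ha
    · have hm2 := ih (fun x hx => h x (List.mem_cons_of_mem a hx)) hm
      nlinarith

lemma prod_ne_zero (l : List Int) (h : ∀ x ∈ l, x ≠ 0) : l.prod ≠ 0 := by
  induction l with
  | nil => simp
  | cons a m ih =>
    rw [List.prod_cons]
    have ha := h a List.mem_cons_self
    have hm := ih (fun x hx => h x (List.mem_cons_of_mem a hx))
    exact mul_ne_zero ha hm

lemma wprod_mem (t : List Int) (i j k : Nat) (hik : i ≤ k) (hkj : k ≤ j) (hj : j < t.length) :
    t.getD k 0 ∈ (t.drop i).take (j + 1 - i) := by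
  have hk : k < t.length := by omega
  rw [List.getD_eq_getElem t 0 hk]
  have h1 : k - i < (t.drop i).length := by rw [List.length_drop]; omega
  have h2 : (t.drop i)[k - i] = t[k] := by
    rw [List.getElem_drop]
    congr 1
    omega
  rw [← h2]
  exact List.mem_take_iff_getElem.mpr ⟨k - i, by omega, rfl⟩

lemma slice_mem_index (t : List Int) (i j : Nat) (x : Int)
    (hx : x ∈ (t.drop i).take (j + 1 - i)) :
    ∃ k, i ≤ k ∧ k ≤ j ∧ k < t.length ∧ t.getD k 0 = x := by
  obtain ⟨k, hk, hval⟩ := List.mem_take_iff_getElem.mp hx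
  have hlen : k < (t.drop i).length := by omega
  rw [List.getElem_drop] at hval
  have hkl : i + k < t.length := by
    rw [List.length_drop] at hlen; omega
  refine ⟨i + k, by omega, by omega, hkl, ?_⟩
  rw [List.getD_eq_getElem t 0 hkl, hval]

-- nonzero everywhere, and ≠ ±1 off the head, make the window product detect emptiness
lemma wprod_one_iff (t : List Int) (h0 : ∀ x ∈ t, x ≠ 0) (hhead : t.getD 0 0 ≠ 1)
    (i j : Nat) (hj : j < t.length)
    (HW : ∀ k, i ≤ k → k ≤ j → 1 ≤ k → (t.getD k 0 ≠ 1 ∧ t.getD k 0 ≠ -1)) :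
    (wprod t i j = 1 ↔ j + 1 ≤ i) := by
  constructor
  · intro hP
    by_contra hgt
    have hij : i ≤ j := by omega
    by_cases hi0 : i = 0
    · subst hi0
      by_cases hj0 : j = 0
      · subst hj0
        have : wprod t 0 0 = t.getD 0 0 := by
          unfold wprod
          cases t with
          | nil => simp at hj
          | cons a l => simp
        rw [this] at hP
        exact hhead hP
      · rw [wprod_shrink t 0 j (by omega) hj] at hP
        have habs : 2 ≤ |wprod t 1 j| := by
          apply abs_prod_ge
          · intro x hx
            obtain ⟨k, hik, hkj, hkl, hval⟩ := slice_mem_index t 1 j x hx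
            obtain ⟨hk1, hk2⟩ := HW k (by omega) hkj (by omega)
            have hk0 : t.getD k 0 ≠ 0 := by
              rw [List.getD_eq_getElem t 0 hkl]
              exact h0 _ (List.getElem_mem hkl)
            rw [hval] at hk1 hk2 hk0
            rcases abs_cases x with ⟨he, _⟩ | ⟨he, _⟩ <;> omega
          · intro hemp
            have : (1:Nat) ≤ j := by omega
            have := wprod_mem t 1 j 1 le_rfl (by omega) hj
            rw [hemp] at this
            simp at this
        have h00 : t.getD 0 0 ≠ 0 := by
          have h0l : 0 < t.length := by omega
          rw [List.getD_eq_getElem t 0 h0l]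
          exact h0 _ (List.getElem_mem h0l)
        have : |t.getD 0 0 * wprod t 1 j| = 1 := by rw [hP]; simp
        rw [abs_mul] at this
        have h1 : 1 ≤ |t.getD 0 0| := by
          rcases abs_cases (t.getD 0 0) with ⟨he, _⟩ | ⟨he, _⟩ <;> omega
        nlinarith
    · have habs : 2 ≤ |wprod t i j| := by
        apply abs_prod_ge
        · intro x hx
          obtain ⟨k, hik, hkj, hkl, hval⟩ := slice_mem_index t i j x hx
          obtain ⟨hk1, hk2⟩ := HW k hik hkj (by omega)
          have hk0 : t.getD k 0 ≠ 0 := by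
            rw [List.getD_eq_getElem t 0 hkl]
            exact h0 _ (List.getElem_mem hkl)
          rw [hval] at hk1 hk2 hk0
          rcases abs_cases x with ⟨he, _⟩ | ⟨he, _⟩ <;> omega
        · intro hemp
          have := wprod_mem t i j i le_rfl hij hj
          rw [hemp] at this
          simp at this
      rw [hP] at habs
      simp at habs
  · intro h
    exact wprod_empty t i j h

lemma wprod_ne_zero (t : List Int) (h0 : ∀ x ∈ t, x ≠ 0) (i j : Nat) : wprod t i j ≠ 0 := by
  unfold wprod
  apply prod_ne_zero
  intro x hx
  exact h0 x (List.mem_of_mem_drop (List.mem_of_mem_take hx))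

lemma floordiv_exact (g W : Int) (hg : g ≠ 0) : PySem.Int.floordiv (g * W) g = W := by
  show Int.fdiv (g * W) g = W
  exact Int.mul_fdiv_cancel_left W hg

lemma wprod_zero_zero (t : List Int) (h : t ≠ []) : wprod t 0 0 = t.getD 0 0 := by
  cases t with
  | nil => exact absurd rfl h
  | cons a l => simp [wprod]

lemma shrinkB_run (t : List Int) (h0 : ∀ x ∈ t, x ≠ 0) (n : Int) (j : Nat)
    (hj : j < t.length) : ∀ (k i : Nat) (f₁ f₂ : Nat), i + k = j + 1 → k ≤ f₁ → k ≤ f₂ →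
    shrinkB t n f₁ (i : Int) (wprod t i j) = shrinkB t n f₂ (i : Int) (wprod t i j) := by
  intro k
  induction k with
  | zero =>
    intro i f₁ f₂ hk _ _
    have hP : wprod t i j = 1 := wprod_empty t i j (by omega)
    have hc : (!(wprod t i j == 1) && !(pv_ok n (wprod t i j))) = false := by
      rw [hP]; simp
    have hall : ∀ f : Nat, shrinkB t n f (i : Int) (wprod t i j) = ((i : Int), wprod t i j) := by
      intro f
      cases f with
      | zero => rfl
      | succ f => simp only [shrinkB, hc, Bool.false_eq_true, if_false]
    rw [hall f₁, hall f₂]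
  | succ k ihk =>
    intro i f₁ f₂ hk h1 h2
    have hij : i ≤ j := by omega
    obtain ⟨g1, hf1⟩ : ∃ g1, f₁ = g1 + 1 := ⟨f₁ - 1, by omega⟩
    obtain ⟨g2, hf2⟩ : ∃ g2, f₂ = g2 + 1 := ⟨f₂ - 1, by omega⟩
    subst hf1; subst hf2
    by_cases hc : (!(wprod t i j == 1) && !(pv_ok n (wprod t i j))) = true
    · simp only [shrinkB, hc, if_true]
      have hgd : PySem.List.pyGetD t (i : Int) 0 = t.getD i 0 := by
        rw [PySem.List.pyGetD_natCast]
      have hi : i < t.length := by omega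
      have hti : t.getD i 0 ≠ 0 := by
        rw [List.getD_eq_getElem t 0 hi]
        exact h0 _ (List.getElem_mem hi)
      have hP' : PySem.Int.floordiv (wprod t i j) (PySem.List.pyGetD t (i : Int) 0)
          = wprod t (i+1) j := by
        rw [hgd, wprod_shrink t i j hij (by omega), floordiv_exact _ _ hti]
      rw [hP']
      have hcast : ((i : Int) + 1) = ((i + 1 : Nat) : Int) := by push_cast; ring
      rw [hcast]
      exact ihk (i+1) g1 g2 (by omega) (by omega) (by omega)
    · have hc' : (!(wprod t i j == 1) && !(pv_ok n (wprod t i j))) = false := by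
        cases hv : (!(wprod t i j == 1) && !(pv_ok n (wprod t i j)))
        · rfl
        · exact absurd hv hc
      simp only [shrinkB, hc', Bool.false_eq_true, if_false]

lemma loopA_succ (t : List Int) (f : Nat) (i j L M P : Int) :
    loopA t (f+1) i j L M P =
    (if j ≠ (t.length : Int) - 1 then
      if is_valid (PySem.List.pyGetD t (j+1) 0) P then
        loopA t f i (j+1) (L + 1) (if L + 1 > M then L + 1 else M) (P * PySem.List.pyGetD t (j+1) 0)
      else if P == 1 then
        loopA t f (i+1) (j+1) L M P
      else
        loopA t f (i+1) j (L - 1) M (PySem.Int.floordiv P (PySem.List.pyGetD t i 0))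
    else M) := rfl

lemma loopB_succ (t : List Int) (rem j : Nat) (i best product : Int) :
    loopB t (rem+1) j i best product =
    (if pv_ok (PySem.List.pyGetD t (j : Int) 0)
          (shrinkB t (PySem.List.pyGetD t (j : Int) 0) (t.length + 1) i product).2 then
       loopB t rem (j+1) (shrinkB t (PySem.List.pyGetD t (j : Int) 0) (t.length + 1) i product).1
         (if (j : Int) - (shrinkB t (PySem.List.pyGetD t (j : Int) 0) (t.length + 1) i product).1 + 1 > best
          then (j : Int) - (shrinkB t (PySem.List.pyGetD t (j : Int) 0) (t.length + 1) i product).1 + 1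
          else best)
         ((shrinkB t (PySem.List.pyGetD t (j : Int) 0) (t.length + 1) i product).2
           * PySem.List.pyGetD t (j : Int) 0)
     else
       loopB t rem (j+1) ((j : Int) + 1) best
         (shrinkB t (PySem.List.pyGetD t (j : Int) 0) (t.length + 1) i product).2) := rfl

set_option maxRecDepth 16384 in
lemma lockstep (t : List Int) (h0 : ∀ x ∈ t, x ≠ 0) (hhead : t.getD 0 0 ≠ 1) :
    ∀ (μ : Nat), ∀ (i j : Nat) (best : Int) (fuelA : Nat),
    i ≤ j + 1 → j < t.length →
    (∀ k, i ≤ k → k ≤ j → 1 ≤ k → (t.getD k 0 ≠ 1 ∧ t.getD k 0 ≠ -1)) →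
    2 * (t.length - j) + (j + 1 - i) ≤ μ →
    2 * (t.length - j) + (j + 1 - i) ≤ fuelA →
    loopA t fuelA (i : Int) (j : Int) ((j : Int) - (i : Int) + 1) best (wprod t i j)
      = loopB t (t.length - (j + 1)) (j + 1) (i : Int) best (wprod t i j) := by
  intro μ
  induction μ with
  | zero => intro i j best fuelA hij hj HW hμ hf; omega
  | succ μ ih =>
    intro i j best fuelA hij hj HW hμ hf
    obtain ⟨f, rfl⟩ : ∃ f, fuelA = f + 1 := ⟨fuelA - 1, by omega⟩
    by_cases hend : j + 1 = t.length
    · have hrem : t.length - (j + 1) = 0 := by omega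
      have hguard : ¬ ((j : Int) ≠ (t.length : Int) - 1) := by omega
      rw [loopA_succ, if_neg hguard, hrem]
      rfl
    · have hj1 : j + 1 < t.length := by omega
      have hguard : ((j : Int) ≠ (t.length : Int) - 1) := by omega
      set n := t.getD (j+1) 0 with hn_def
      have hgd1 : PySem.List.pyGetD t ((j : Int) + 1) 0 = n := by
        have hc : ((j : Int) + 1) = ((j + 1 : Nat) : Int) := by push_cast; ring
        rw [hc, PySem.List.pyGetD_natCast]
      have hgdB : PySem.List.pyGetD t (((j + 1 : Nat) : Int)) 0 = n := by
        rw [PySem.List.pyGetD_natCast]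
      have hn0 : n ≠ 0 := by
        rw [hn_def, List.getD_eq_getElem t 0 hj1]
        exact h0 _ (List.getElem_mem hj1)
      have hbr := is_valid_eq_pv_ok n (wprod t i j) hn0
      have hP0 : wprod t i j ≠ 0 := wprod_ne_zero t h0 i j
      have hone := wprod_one_iff t h0 hhead i j hj HW
      have hrem : t.length - (j + 1) = (t.length - (j + 2)) + 1 := by omega
      have hc1 : ((j : Int) + 1) = ((j + 1 : Nat) : Int) := by push_cast; ring
      rw [loopA_succ, if_pos hguard, hgd1]
      rw [hrem, loopB_succ, hgdB]
      by_cases hok : pv_ok n (wprod t i j) = true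
      · -- the element joins: both extend without shrinking
        have hvalid : is_valid n (wprod t i j) = true := by rw [hbr, hok]
        rw [if_pos hvalid]
        have hshr : shrinkB t n (t.length + 1) (i : Int) (wprod t i j)
            = ((i : Int), wprod t i j) := by
          have hcnd : (!(wprod t i j == 1) && !(pv_ok n (wprod t i j))) = false := by
            rw [hok]; simp
          simp only [shrinkB, hcnd, Bool.false_eq_true, if_false]
        rw [hshr]
        simp only [if_pos hok]
        have hext : wprod t i j * n = wprod t i (j+1) := by
          rw [wprod_extend t i j hij hj1, hn_def]
        have hn1 : n ≠ 1 ∧ n ≠ -1 := by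
          constructor
          · intro he
            have : n ∣ wprod t i j := he ▸ one_dvd _
            have hmm : (PySem.Int.mod (wprod t i j) n == 0) = true := by
              simp [PySem.Int.mod_eq_zero_iff_dvd, this]
            unfold pv_ok at hok
            rw [hmm] at hok
            simp at hok
          · intro he
            have : n ∣ wprod t i j := by
              rw [he]
              exact ⟨-(wprod t i j), by ring⟩
            have hmm : (PySem.Int.mod (wprod t i j) n == 0) = true := by
              simp [PySem.Int.mod_eq_zero_iff_dvd, this]
            unfold pv_ok at hok
            rw [hmm] at hok
            simp at hok
        have HW' : ∀ k, i ≤ k → k ≤ j + 1 → 1 ≤ k → (t.getD k 0 ≠ 1 ∧ t.getD k 0 ≠ -1) := by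
          intro k hk1 hk2 hk3
          by_cases hkj : k ≤ j
          · exact HW k hk1 hkj hk3
          · have : k = j + 1 := by omega
            subst this
            exact hn1
        have ihx := ih i (j+1)
          (if (j : Int) - (i : Int) + 1 + 1 > best then (j : Int) - (i : Int) + 1 + 1 else best)
          f (by omega) hj1 HW' (by omega) (by omega)
        have hc2 : ((j + 1 : Nat) : Int) - (i : Int) + 1 = (j : Int) - (i : Int) + 1 + 1 := by
          push_cast; ring
        rw [hc2] at ihx
        rw [hc1, hext, ihx]
        have h22 : j + 1 + 1 = j + 2 := by omega
        rw [h22]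
        simp only [hc2]
      · have hok' : pv_ok n (wprod t i j) = false := by
          cases hv : pv_ok n (wprod t i j)
          · rfl
          · exact absurd hv hok
        have hvalid : is_valid n (wprod t i j) = false := by rw [hbr, hok']
        rw [hvalid]
        simp only [Bool.false_eq_true, if_false]
        by_cases hii : i = j + 1
        · -- empty window: both skip the element
          subst hii
          have hP : wprod t (j+1) j = 1 := wprod_empty t (j+1) j (by omega)
          have heq1 : ((wprod t (j+1) j == 1) = true) := by rw [hP]; simp
          rw [if_pos heq1]
          have hshr : shrinkB t n (t.length + 1) ((j+1 : Nat) : Int) (wprod t (j+1) j)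
              = (((j+1 : Nat) : Int), 1) := by
            rw [hP]
            obtain ⟨g, hg⟩ : ∃ g, t.length + 1 = g + 1 := ⟨t.length, rfl⟩
            rw [hg]
            simp [shrinkB]
          rw [hshr]
          have hok1 : pv_ok n (((j+1 : Nat) : Int), (1:Int)).2 = false := by
            have := hok'
            rw [hP] at this
            exact this
          rw [hok1]
          simp only [Bool.false_eq_true, if_false]
          have hc5 : (((j+1 : Nat) : Int) + 1) = ((j + 2 : Nat) : Int) := by push_cast; ring
          have hc6 : ((j : Int) + 1) = ((j + 1 : Nat) : Int) := by push_cast; ring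
          have hc7 : (j : Int) - ((j+1 : Nat) : Int) + 1
              = ((j+1 : Nat) : Int) - ((j+2 : Nat) : Int) + 1 := by
            push_cast; ring
          have hw2 : wprod t (j+2) (j+1) = 1 := wprod_empty t (j+2) (j+1) (by omega)
          have HW' : ∀ k, j + 2 ≤ k → k ≤ j + 1 → 1 ≤ k → (t.getD k 0 ≠ 1 ∧ t.getD k 0 ≠ -1) := by
            intro k hk1 hk2; omega
          have ihx := ih (j+2) (j+1) best f (by omega) hj1 HW' (by omega) (by omega)
          rw [hw2] at ihx
          rw [hc5, hc6, hc7, hP, ihx]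
        · -- nonempty window: both shrink by one element, A re-enters its loop, B its while
          have hii' : i ≤ j := by omega
          have hPne : wprod t i j ≠ 1 := by
            intro hP
            exact absurd (hone.mp hP) (by omega)
          have hne1 : ¬ ((wprod t i j == 1) = true) := by
            simp only [beq_iff_eq]
            exact hPne
          rw [if_neg hne1]
          have hgdi : PySem.List.pyGetD t ((i : Int)) 0 = t.getD i 0 := by
            rw [PySem.List.pyGetD_natCast]
          have hi : i < t.length := by omega
          have hti : t.getD i 0 ≠ 0 := by
            rw [List.getD_eq_getElem t 0 hi]
            exact h0 _ (List.getElem_mem hi)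
          have hshr1 : PySem.Int.floordiv (wprod t i j) (PySem.List.pyGetD t ((i : Int)) 0)
              = wprod t (i+1) j := by
            rw [hgdi, wprod_shrink t i j hii' (by omega), floordiv_exact _ _ hti]
          have hc3 : ((i : Int) + 1) = ((i + 1 : Nat) : Int) := by push_cast; ring
          have hc4 : (j : Int) - (i : Int) + 1 - 1 = (j : Int) - ((i + 1 : Nat) : Int) + 1 := by
            push_cast; ring
          have HW' : ∀ k, i + 1 ≤ k → k ≤ j → 1 ≤ k → (t.getD k 0 ≠ 1 ∧ t.getD k 0 ≠ -1) := by
            intro k hk1 hk2 hk3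
            exact HW k (by omega) hk2 hk3
          have ihx := ih (i+1) j best f (by omega) hj HW' (by omega) (by omega)
          rw [hshr1, hc3, hc4, ihx, hrem, loopB_succ, hgdB]
          have hcnd : (!(wprod t i j == 1) && !(pv_ok n (wprod t i j))) = true := by
            rw [hok']
            simp [hPne]
          have hkey : shrinkB t n (t.length + 1) (i : Int) (wprod t i j)
              = shrinkB t n (t.length + 1) ((i + 1 : Nat) : Int) (wprod t (i+1) j) := by
            have hstep : shrinkB t n (t.length + 1) (i : Int) (wprod t i j)
                = shrinkB t n t.length ((i + 1 : Nat) : Int) (wprod t (i+1) j) := by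
              simp only [shrinkB, hcnd, if_true]
              rw [hshr1, hc3]
            rw [hstep]
            exact shrinkB_run t h0 n j hj (j - i) (i+1) t.length (t.length + 1)
              (by omega) (by omega) (by omega)
          rw [hkey]

-- ===== VERDICT (by name: the statement is the Claim_ definition above) =====
theorem ss_prime_factors_spec : Claim_equal_ss_prime_factors := by
  intro t _ hpre
  obtain ⟨hne, hhead, h0⟩ := hpre
  have hlen : 1 ≤ t.length := by
    cases t with
    | nil => exact absurd rfl hne
    | cons a l => simp
  have hgd0 : PySem.List.pyGetD t 0 0 = t.getD 0 0 := PySem.List.pyGetD_zero t 0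
  have hw00 : wprod t 0 0 = t.getD 0 0 := wprod_zero_zero t hne
  have hlock := lockstep t h0 hhead (2 * t.length + 1) 0 0 1 (2 * t.length + 2)
    (by omega) (by omega) (by intro k hk1 hk2 hk3; omega) (by omega) (by omega)
  rw [hw00] at hlock
  show ss_prime_factors t = ss_prime_factors_alt t
  unfold ss_prime_factors ss_prime_factors_alt
  rw [hgd0]
  have h1 : t.length - (0 + 1) = t.length - 1 := by omega
  rw [h1] at hlock
  simpa using hlock
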